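-- pv_equiv track=rewrite | github.com/tsullivan/dragon-dice | views/melee_combat_dialog.py | _count_result_type
-- ===== SOURCE A (Python) =====
-- from typing import Any, Dict, List
--
-- def _count_result_type(roll_results: Dict[str, List[str]], target_types: List[str]) -> int:
--     """Count specific result types from roll results."""
--     count = 0
--     for _unit_name, face_results in roll_results.items():
--         for face_result in face_results:
--             if face_result:
--                 normalized = face_result.lower().strip()
--                 if normalized in target_types:
--                     count += 1
--     return count
-- ===== SOURCE B (Python) =====
-- def _count_result_type(roll_results, target_types):
--     """Count specific result types: aggregate a histogram of normalized results, then query distinct targets."""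
--     counts = {}
--     for face_results in roll_results.values():
--         for face_result in face_results:
--             if face_result:
--                 key = face_result.lower().strip()
--                 counts[key] = counts.get(key, 0) + 1
--     return sum(counts.get(t, 0) for t in set(target_types))
-- ===== Notes on version B (the rewrite author's own statement) =====
-- stated objective: faster
-- what changed: B replaces the per-result membership test against target_types by a two-phase aggregate-then-query computation: one pass builds a dict histogram of the normalized truthy face results, then the answer is the sum of the histogram counts over the distinct target types.
import Mathlib
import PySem

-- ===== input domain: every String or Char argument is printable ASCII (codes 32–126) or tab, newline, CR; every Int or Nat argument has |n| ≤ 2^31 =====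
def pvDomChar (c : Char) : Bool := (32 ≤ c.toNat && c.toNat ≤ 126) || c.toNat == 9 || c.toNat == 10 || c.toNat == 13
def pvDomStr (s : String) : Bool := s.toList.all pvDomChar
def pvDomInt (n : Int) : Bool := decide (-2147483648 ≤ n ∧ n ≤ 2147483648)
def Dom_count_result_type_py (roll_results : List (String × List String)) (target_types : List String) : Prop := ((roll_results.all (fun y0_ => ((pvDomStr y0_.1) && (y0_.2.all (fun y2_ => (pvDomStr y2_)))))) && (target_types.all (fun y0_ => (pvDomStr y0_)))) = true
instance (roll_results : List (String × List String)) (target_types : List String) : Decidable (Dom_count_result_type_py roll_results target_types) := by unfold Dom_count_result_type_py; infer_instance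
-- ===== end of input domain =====

-- B replaces A's per-result membership scan of target_types by a two-phase computation: one pass
-- builds a dict histogram of the normalized truthy face results, then sums it over the distinct targets.
-- ===== PORT A =====
def count_result_type_py (roll_results : List (String × List String)) (target_types : List String) : Int :=
  roll_results.foldl (fun count p =>
    p.2.foldl (fun count face_result =>
      if face_result ≠ "" then
        if target_types.contains (PySem.Str.strip (PySem.Str.lower face_result)) then count + 1
        else count
      else count) count) 0

-- ===== PORT B =====
def count_result_type_py_alt (roll_results : List (String × List String)) (target_types : List String) : Int :=
  let counts : PySem.Dict String Int :=
    roll_results.foldl (fun counts p =>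
      p.2.foldl (fun counts face_result =>
        if face_result ≠ "" then
          counts.insert (PySem.Str.strip (PySem.Str.lower face_result))
            (counts.getD (PySem.Str.strip (PySem.Str.lower face_result)) 0 + 1)
        else counts) counts) PySem.Dict.empty
  (PySem.Set.ofList target_types).foldl (fun acc t => acc + counts.getD t 0) 0

-- ===== PRECONDITION & SPEC =====
def Spec_count_result_type_py (roll_results : List (String × List String)) (target_types : List String) (out : Int) : Prop := out = count_result_type_py_alt roll_results target_types
instance (roll_results : List (String × List String)) (target_types : List String) (out : Int) : Decidable (Spec_count_result_type_py roll_results target_types out) := by unfold Spec_count_result_type_py; infer_instance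

-- ===== CLAIM (what is proved, stated in full; the proofs are below) =====
def Claim_equal_count_result_type_py : Prop := ∀ (roll_results : List (String × List String)) (target_types : List String), Dom_count_result_type_py roll_results target_types → Spec_count_result_type_py roll_results target_types (count_result_type_py roll_results target_types)

-- ===== LEMMAS AND PROOFS =====

-- the normalized truthy face results, flattened (A counts its members of target_types; B histograms it)
def pvNorms (roll_results : List (String × List String)) : List String :=
  roll_results.flatMap (fun p =>
    (p.2.filter (fun s => s ≠ "")).map (fun s => PySem.Str.strip (PySem.Str.lower s)))

theorem pvA_inner (tt : List String) (frs : List String) (c : Int) :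
    frs.foldl (fun count face_result =>
      if face_result ≠ "" then
        if tt.contains (PySem.Str.strip (PySem.Str.lower face_result)) then count + 1
        else count
      else count) c
    = c + (((frs.filter (fun s => s ≠ "")).map (fun s => PySem.Str.strip (PySem.Str.lower s))).countP
            (fun n => tt.contains n) : Int) := by
  induction frs generalizing c with
  | nil => simp
  | cons f frs ih =>
    rw [List.foldl_cons]
    by_cases hf : f = ""
    · rw [if_neg (by simp [hf]), ih, List.filter_cons_of_neg (by simp [hf])]
    · rw [if_pos hf, List.filter_cons_of_pos (by simp [hf]), List.map_cons, List.countP_cons]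
      by_cases hm : tt.contains (PySem.Str.strip (PySem.Str.lower f))
      · rw [if_pos hm, ih]
        simp only [hm, if_pos]
        push_cast; ring
      · rw [if_neg hm, ih]
        simp only [hm, Bool.false_eq_true, if_false]
        push_cast; ring

theorem pvA_outer (tt : List String) (rr : List (String × List String)) (c : Int) :
    rr.foldl (fun count p =>
      p.2.foldl (fun count face_result =>
        if face_result ≠ "" then
          if tt.contains (PySem.Str.strip (PySem.Str.lower face_result)) then count + 1
          else count
        else count) count) c
    = c + ((pvNorms rr).countP (fun n => tt.contains n) : Int) := by
  induction rr generalizing c with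
  | nil => simp [pvNorms]
  | cons p rr ih =>
    rw [List.foldl_cons, pvA_inner, ih]
    simp only [pvNorms, List.flatMap_cons, List.countP_append]
    push_cast; ring

theorem pvB_inner (frs : List String) (d : PySem.Dict String Int) :
    frs.foldl (fun counts face_result =>
      if face_result ≠ "" then
        counts.insert (PySem.Str.strip (PySem.Str.lower face_result))
          (counts.getD (PySem.Str.strip (PySem.Str.lower face_result)) 0 + 1)
      else counts) d
    = ((frs.filter (fun s => s ≠ "")).map (fun s => PySem.Str.strip (PySem.Str.lower s))).foldl
        (fun d k => d.insert k (d.getD k 0 + 1)) d := by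
  induction frs generalizing d with
  | nil => rfl
  | cons f frs ih =>
    rw [List.foldl_cons]
    by_cases hf : f = ""
    · rw [if_neg (by simp [hf]), ih, List.filter_cons_of_neg (by simp [hf])]
    · rw [if_pos hf, ih, List.filter_cons_of_pos (by simp [hf]), List.map_cons, List.foldl_cons]

theorem pvB_counts (rr : List (String × List String)) (d : PySem.Dict String Int) (t : String) :
    (rr.foldl (fun counts p =>
      p.2.foldl (fun counts face_result =>
        if face_result ≠ "" then
          counts.insert (PySem.Str.strip (PySem.Str.lower face_result))
            (counts.getD (PySem.Str.strip (PySem.Str.lower face_result)) 0 + 1)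
        else counts) counts) d).getD t 0
    = d.getD t 0 + ((pvNorms rr).count t : Int) := by
  induction rr generalizing d with
  | nil => simp [pvNorms]
  | cons p rr ih =>
    rw [List.foldl_cons, pvB_inner, ih, PySem.Dict.getD_foldl_insert_add_one]
    simp only [pvNorms, List.flatMap_cons, List.count_append]
    push_cast; ring

theorem pvFoldlAdd (g : String → Int) (ts : List String) (c : Int) :
    ts.foldl (fun a t => a + g t) c = c + (ts.map g).sum := by
  induction ts generalizing c with
  | nil => simp
  | cons t ts ih => rw [List.foldl_cons, ih, List.map_cons, List.sum_cons]; ring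

theorem pvIndSum (n : String) (ts : List String) (h : ts.Nodup) :
    (ts.map (fun t => if t = n then (1 : Int) else 0)).sum
      = if ts.contains n then 1 else 0 := by
  induction ts with
  | nil => simp
  | cons t ts ih =>
    rcases List.nodup_cons.mp h with ⟨hnm, hts⟩
    by_cases ht : t = n
    · subst ht
      have hz : (ts.map (fun x => if x = t then (1 : Int) else 0)).sum = 0 :=
        List.sum_eq_zero (by
          intro x hx
          rcases List.mem_map.mp hx with ⟨y, hy, rfl⟩
          exact if_neg (by rintro rfl; exact hnm hy))
      simp [hz]
    · simp only [List.map_cons, List.sum_cons, if_neg ht, ih hts, List.contains_cons, zero_add]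
      have hb : (n == t) = false := by
        simp only [beq_eq_false_iff_ne, ne_eq]
        exact fun e => ht e.symm
      rw [hb, Bool.false_or]

theorem pvCountSum (ts ns : List String) (h : ts.Nodup) :
    (ts.map (fun t => (ns.count t : Int))).sum
      = ((ns.countP (fun x => ts.contains x) : Nat) : Int) := by
  induction ns with
  | nil => simp
  | cons n ns ih =>
    have h1 : ts.map (fun t => ((n :: ns).count t : Int))
        = ts.map (fun t => (ns.count t : Int) + (if t = n then (1 : Int) else 0)) := by
      apply List.map_congr_left
      intro t _
      rw [List.count_cons]
      by_cases ht : t = n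
      · simp [ht]
      · have : ¬n = t := fun e => ht e.symm
        simp [ht, this]
    rw [h1, List.sum_map_add, ih, pvIndSum n ts h, List.countP_cons]
    by_cases hn : ts.contains n <;> simp

theorem pvContains_ofList (tt : List String) (x : String) :
    List.contains (PySem.Set.ofList tt) x = tt.contains x := by
  by_cases hx : x ∈ tt <;> simp [hx, PySem.Set.mem_ofList]

-- ===== VERDICT (by name: the statement is the Claim_ definition above) =====
theorem count_result_type_py_spec : Claim_equal_count_result_type_py := by
  intro rr tt _
  unfold Spec_count_result_type_py count_result_type_py count_result_type_py_alt
  rw [pvA_outer]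
  have hfun : (fun (a : Int) (t : String) =>
      a + (rr.foldl (fun counts p =>
        p.2.foldl (fun counts face_result =>
          if face_result ≠ "" then
            counts.insert (PySem.Str.strip (PySem.Str.lower face_result))
              (counts.getD (PySem.Str.strip (PySem.Str.lower face_result)) 0 + 1)
          else counts) counts) PySem.Dict.empty).getD t 0)
      = (fun (a : Int) (t : String) => a + ((pvNorms rr).count t : Int)) := by
    funext a t
    rw [pvB_counts]
    simp [PySem.Dict.getD_empty]
  simp only []
  rw [hfun, pvFoldlAdd (fun t => ((pvNorms rr).count t : Int)), pvCountSum _ _ (PySem.Set.nodup_ofList tt)]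
  have : (pvNorms rr).countP (fun x => List.contains (PySem.Set.ofList tt) x)
      = (pvNorms rr).countP (fun x => tt.contains x) := by
    apply List.countP_congr
    intro x _
    rw [pvContains_ofList]
  rw [this]
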